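-- pv_equiv track=rewrite | github.com/MrBrantCode/unitest_baseline | mut_generate/mist_train_cf/cf_15408/solution.py | binary_search_smallest
-- ===== SOURCE A (Python) =====
-- def binary_search_smallest(arr, target):
--     left = 0
--     right = len(arr) - 1
--     smallest = float('inf')
--
--     while left <= right:
--         middle = (left + right) // 2
--
--         if arr[middle] >= target:
--             smallest = min(smallest, arr[middle])
--             right = middle - 1
--         else:
--             left = middle + 1
--
--     if smallest == float('inf'):
--         return -1
--     else:
--         return arr.index(smallest)
-- ===== SOURCE B (Python) =====
-- def binary_search_smallest(arr, target):
--     # Staged decomposition: first record the binary-search probe path as a list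
--     # of indices (recursively, no accumulator), then filter/minimize/index in
--     # separate passes over that list.
--     def probes(lo, hi):
--         if lo > hi:
--             return []
--         mid = (lo + hi) // 2
--         if arr[mid] >= target:
--             return [mid] + probes(lo, mid - 1)
--         return [mid] + probes(mid + 1, hi)
--
--     hits = [arr[i] for i in probes(0, len(arr) - 1) if arr[i] >= target]
--     if not hits:
--         return -1
--     return arr.index(min(hits))
-- ===== Notes on version B (the rewrite author's own statement) =====
-- stated objective: alternative
-- what changed: Replaces the single while loop that threads a float('inf') minimum accumulator by staged passes: a recursive helper first materialises the binary-search probe path as a list of indices, then separate passes filter the probed values >= target, take min(), and look up its index.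
import Mathlib
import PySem

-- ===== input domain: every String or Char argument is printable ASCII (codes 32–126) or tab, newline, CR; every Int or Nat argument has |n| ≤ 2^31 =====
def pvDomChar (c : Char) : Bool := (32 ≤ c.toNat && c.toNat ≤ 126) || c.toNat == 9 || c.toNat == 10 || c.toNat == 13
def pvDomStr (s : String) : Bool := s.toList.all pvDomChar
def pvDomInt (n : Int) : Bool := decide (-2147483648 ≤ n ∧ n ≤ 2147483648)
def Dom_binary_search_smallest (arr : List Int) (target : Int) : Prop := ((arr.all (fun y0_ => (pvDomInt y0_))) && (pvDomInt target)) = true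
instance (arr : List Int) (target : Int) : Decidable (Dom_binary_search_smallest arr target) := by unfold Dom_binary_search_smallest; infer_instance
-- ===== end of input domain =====

-- B replaces A's while loop with a float('inf') minimum accumulator by staged passes:
-- materialise the binary-search probe path as a list of indices, then filter / min / index in later passes.

-- ===== PORT A =====
-- A's while loop: state (left, right, smallest); smallest = float('inf') ported as Option Int (none = inf),
-- min(smallest, arr[middle]) ported branch-for-branch. arr[middle] via pyGet? (in-range on every reachable call;
-- the none branch is unreachable and keeps the accumulator).
def goA (arr : List Int) (target : Int) (left right : Int) (smallest : Option Int) : Option Int :=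
  if h : left ≤ right then
    match PySem.List.pyGet? arr (PySem.Int.floordiv (left + right) 2) with
    | none => smallest
    | some v =>
      if v ≥ target then
        goA arr target left (PySem.Int.floordiv (left + right) 2 - 1)
          (some (match smallest with
                 | none => v
                 | some s => min s v))
      else
        goA arr target (PySem.Int.floordiv (left + right) 2 + 1) right smallest
  else smallest
termination_by (right - left + 1).toNat
decreasing_by
  · have := PySem.Int.floordiv_two_mid_bounds h
    omega
  · have := PySem.Int.floordiv_two_mid_bounds h
    omega

def binary_search_smallest (arr : List Int) (target : Int) : Int :=
  match goA arr target 0 ((arr.length : Int) - 1) none with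
  | none => -1
  | some s =>
    match PySem.List.index? arr s with
    | none => -1          -- unreachable: smallest is always an element of arr
    | some i => (i : Int)

-- ===== PORT B =====
-- B's probes(lo, hi): the binary-search probe path as a plain list of indices (no accumulator).
-- arr[mid] via pyGet? (always in range on reachable calls; the none branch is unreachable).
def probesB (arr : List Int) (target : Int) (lo hi : Int) : List Int :=
  if h : lo > hi then []
  else
    match PySem.List.pyGet? arr (PySem.Int.floordiv (lo + hi) 2) with
    | none => []
    | some v =>
      PySem.Int.floordiv (lo + hi) 2 ::
        (if v ≥ target then probesB arr target lo (PySem.Int.floordiv (lo + hi) 2 - 1)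
         else probesB arr target (PySem.Int.floordiv (lo + hi) 2 + 1) hi)
termination_by (hi - lo + 1).toNat
decreasing_by
  · have := PySem.Int.floordiv_two_mid_bounds (by omega : lo ≤ hi)
    omega
  · have := PySem.Int.floordiv_two_mid_bounds (by omega : lo ≤ hi)
    omega

-- the comprehension [arr[i] for i in probes if arr[i] >= target]
def hitsB (arr : List Int) (target : Int) (ps : List Int) : List Int :=
  ps.filterMap (fun i =>
    match PySem.List.pyGet? arr i with
    | none => none
    | some v => if v ≥ target then some v else none)

def binary_search_smallest_alt (arr : List Int) (target : Int) : Int :=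
  match PySem.List.min? (hitsB arr target (probesB arr target 0 ((arr.length : Int) - 1))) (fun y => y) with
  | none => -1
  | some m =>
    match PySem.List.index? arr m with
    | none => -1          -- unreachable: m is always an element of arr
    | some i => (i : Int)

-- ===== PRECONDITION & SPEC =====
def Spec_binary_search_smallest (arr : List Int) (target : Int) (out : Int) : Prop := out = binary_search_smallest_alt arr target
instance (arr : List Int) (target : Int) (out : Int) : Decidable (Spec_binary_search_smallest arr target out) := by unfold Spec_binary_search_smallest; infer_instance

-- ===== CLAIM (what is proved, stated in full; the proofs are below) =====
def Claim_equal_binary_search_smallest : Prop := ∀ (arr : List Int) (target : Int), Dom_binary_search_smallest arr target → Spec_binary_search_smallest arr target (binary_search_smallest arr target)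

-- ===== LEMMAS AND PROOFS =====

-- optional-min: combine an accumulator with a result (none = "not seen yet").
def omin : Option Int → Option Int → Option Int
  | none, b => b
  | some s, none => some s
  | some s, some v => some (min s v)

lemma omin_none_right (a : Option Int) : omin a none = a := by cases a <;> rfl

lemma omin_assoc (a b c : Option Int) : omin (omin a b) c = omin a (omin b c) := by
  cases a <;> cases b <;> cases c <;> simp [omin, min_assoc]

lemma foldl_min_min (t : List Int) : ∀ a b : Int, t.foldl min (min a b) = min a (t.foldl min b) := by
  induction t with
  | nil => intro a b; rfl
  | cons c t ih =>
    intro a b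
    show t.foldl min (min (min a b) c) = min a ((c :: t).foldl min b)
    rw [min_assoc, ih]
    rfl

lemma min?_id_cons' (v : Int) (l : List Int) :
    PySem.List.min? (v :: l) (fun y => y) = omin (some v) (PySem.List.min? l (fun y => y)) := by
  cases l with
  | nil => rfl
  | cons x t =>
    rw [PySem.List.min?_id_cons, PySem.List.min?_id_cons]
    show some (t.foldl min (min v x)) = some (min v (t.foldl min x))
    rw [foldl_min_min]

-- Key invariant: A's accumulator loop equals acc ⊓ min over B's filtered probe values.
lemma goA_eq_min_hits (arr : List Int) (t : Int) :
    ∀ (n : Nat) (lo hi : Int) (acc : Option Int), (hi - lo + 1).toNat ≤ n →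
      goA arr t lo hi acc = omin acc (PySem.List.min? (hitsB arr t (probesB arr t lo hi)) (fun y => y)) := by
  intro n
  induction n with
  | zero =>
    intro lo hi acc h
    have hgt : ¬ lo ≤ hi := by omega
    rw [goA, probesB, dif_neg hgt, dif_pos (show hi < lo by omega)]
    exact (omin_none_right acc).symm
  | succ n ih =>
    intro lo hi acc h
    by_cases hle : lo ≤ hi
    · have hmid := PySem.Int.floordiv_two_mid_bounds hle
      rw [goA, probesB]
      rw [dif_pos hle, dif_neg (not_lt.mpr hle)]
      cases hget : PySem.List.pyGet? arr (PySem.Int.floordiv (lo + hi) 2) with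
      | none => exact (omin_none_right acc).symm
      | some v =>
        by_cases hv : v ≥ t
        · simp only [if_pos hv]
          rw [ih lo (PySem.Int.floordiv (lo + hi) 2 - 1) _ (by omega)]
          have hhits : hitsB arr t (PySem.Int.floordiv (lo + hi) 2 ::
              probesB arr t lo (PySem.Int.floordiv (lo + hi) 2 - 1)) =
              v :: hitsB arr t (probesB arr t lo (PySem.Int.floordiv (lo + hi) 2 - 1)) := by
            simp only [hitsB, List.filterMap_cons, hget]; rw [if_pos hv]
          rw [hhits, min?_id_cons']
          have hstep : (some (match acc with | none => v | some s => min s v)) = omin acc (some v) := by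
            cases acc <;> rfl
          rw [hstep, omin_assoc]
        · simp only [if_neg hv]
          rw [ih (PySem.Int.floordiv (lo + hi) 2 + 1) hi acc (by omega)]
          have hhits : hitsB arr t (PySem.Int.floordiv (lo + hi) 2 ::
              probesB arr t (PySem.Int.floordiv (lo + hi) 2 + 1) hi) =
              hitsB arr t (probesB arr t (PySem.Int.floordiv (lo + hi) 2 + 1) hi) := by
            simp only [hitsB, List.filterMap_cons, hget]; rw [if_neg hv]
          rw [hhits]
    · rw [goA, probesB, dif_neg hle, dif_pos (show hi < lo by omega)]
      exact (omin_none_right acc).symm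

-- ===== VERDICT (by name: the statement is the Claim_ definition above) =====
theorem binary_search_smallest_spec : Claim_equal_binary_search_smallest := by
  intro arr target _
  unfold Spec_binary_search_smallest binary_search_smallest binary_search_smallest_alt
  rw [goA_eq_min_hits arr target (((arr.length : Int) - 1) - 0 + 1).toNat 0 _ _ (le_refl _)]
  rfl
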